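-- pv_equiv track=rewrite | github.com/soiejung/Algorithm | 프로그래머스/2/131704. 택배상자/택배상자.py | solution
-- ===== SOURCE A (Python) =====
-- def solution(order):
--     answer = 0
--
--     stack = []
--     idx = 0
--     for i in range(1,len(order)+1):
--         stack.append(i)
--
--         while stack and stack[-1] == order[idx]:
--             stack.pop()
--             answer += 1
--             idx += 1
--
--     return answer
-- ===== SOURCE B (Python) =====
-- def solution(order):
--     n = len(order)
--     answer = 0
--     stack = []
--     next_box = 1
--     for t in order:
--         while next_box <= n and next_box <= t:
--             stack.append(next_box)
--             next_box += 1
--         if stack and stack[-1] == t: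
--             stack.pop()
--             answer += 1
--         else:
--             break
--     return answer
-- ===== Notes on version B (the rewrite author's own statement) =====
-- stated objective: alternative
-- what changed: B drives the loop over the demand sequence (push belt boxes on demand, pop on match, break as soon as a demand cannot be served) instead of A's supply-driven loop over every belt box 1..n; B exits early where A keeps pushing the whole belt.
import Mathlib
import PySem

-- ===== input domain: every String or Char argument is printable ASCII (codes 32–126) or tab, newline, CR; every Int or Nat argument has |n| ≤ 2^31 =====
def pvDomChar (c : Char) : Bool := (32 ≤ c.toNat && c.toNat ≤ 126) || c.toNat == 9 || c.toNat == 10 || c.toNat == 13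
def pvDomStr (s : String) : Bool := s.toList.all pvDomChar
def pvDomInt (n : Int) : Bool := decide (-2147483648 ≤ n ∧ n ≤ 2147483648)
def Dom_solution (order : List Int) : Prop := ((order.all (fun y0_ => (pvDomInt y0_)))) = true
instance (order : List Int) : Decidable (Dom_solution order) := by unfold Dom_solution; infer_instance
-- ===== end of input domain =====

-- B is an alternative, demand-driven decomposition of the same stack simulation (same cost; early exit).

-- ===== PORT A =====
-- The Python stack is kept top-first (Lean head = Python's last element), so
-- `stack.append(i)` is `i :: stack`, `stack[-1]` is the head and `stack.pop()` drops the head.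
-- `while stack and stack[-1] == order[idx]`: `order[idx]` is read via pyGet?; whenever the
-- stack is nonempty, 0 ≤ idx < len(order) holds in Python, so the `none` case never fires there.
def popRun (order : List Int) : Int → Int → List Int → Int × Int × List Int
  | ans, idx, [] => (ans, idx, [])
  | ans, idx, s :: rest =>
    if PySem.List.pyGet? order idx = some s then popRun order (ans + 1) (idx + 1) rest
    else (ans, idx, s :: rest)

def solution (order : List Int) : Int :=
  let st := (PySem.List.pyRange 1 ((order.length : Int) + 1) 1).foldl
    (fun (st : Int × Int × List Int) i => popRun order st.1 st.2.1 (i :: st.2.2)) (0, 0, [])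
  st.1

-- ===== PORT B =====
-- Same top-first stack representation.  `while next_box <= n and next_box <= t: push`:
def pushRun (n t : Int) (next : Int) (stack : List Int) : Int × List Int :=
  if next ≤ n ∧ next ≤ t then pushRun n t (next + 1) (next :: stack) else (next, stack)
  termination_by (n + 1 - next).toNat
  decreasing_by omega

-- `for t in order: … else: break`
def loopB (n : Int) : List Int → Int → List Int → Int → Int
  | [], ans, _, _ => ans
  | t :: rest, ans, stack, next =>
    let p := pushRun n t next stack
    if p.2 ≠ [] ∧ p.2.headI = t then loopB n rest (ans + 1) p.2.tail p.1 else ans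

def solution_alt (order : List Int) : Int :=
  loopB (order.length : Int) order 0 [] 1

-- ===== PRECONDITION & SPEC =====
def Spec_solution (order : List Int) (out : Int) : Prop := out = solution_alt order
instance (order : List Int) (out : Int) : Decidable (Spec_solution order out) := by unfold Spec_solution; infer_instance

-- ===== CLAIM (what is proved, stated in full; the proofs are below) =====
def Claim_equal_solution : Prop := ∀ (order : List Int), Dom_solution order → Spec_solution order (solution order)

-- ===== LEMMAS AND PROOFS =====

-- demands not yet served, as a list
def dsFrom (order : List Int) (idx : Int) : List Int := order.drop idx.toNat

-- a state is "settled" when A's inner while-loop would not pop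
def Settled (order : List Int) (idx : Int) (stack : List Int) : Prop :=
  ∀ s, stack.headI = s → stack ≠ [] → PySem.List.pyGet? order idx ≠ some s

theorem pyGet?_eq_head_dsFrom (order : List Int) (idx : Int) (h : 0 ≤ idx) :
    PySem.List.pyGet? order idx = (dsFrom order idx).head? := by
  rw [PySem.List.pyGet?_of_nonneg order h]
  simp [dsFrom, List.head?_drop]

theorem dsFrom_succ (order : List Int) (idx : Int) (h : 0 ≤ idx) (t : Int)
    (ht : PySem.List.pyGet? order idx = some t) :
    dsFrom order idx = t :: dsFrom order (idx + 1) := by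
  rw [pyGet?_eq_head_dsFrom order idx h] at ht
  have : (idx + 1).toNat = idx.toNat + 1 := by omega
  unfold dsFrom
  rw [this, ← List.drop_drop]
  cases hd : order.drop idx.toNat with
  | nil => simp [dsFrom, hd] at ht
  | cons a l =>
    simp [dsFrom, hd] at ht
    simp [ht]

-- accumulator lemma for loopB
theorem loopB_acc (n : Int) (ds : List Int) (ans : Int) (st : List Int) (next : Int) :
    loopB n ds ans st next = ans + loopB n ds 0 st next := by
  induction ds generalizing ans st next with
  | nil => simp [loopB]
  | cons t rest ih =>
    simp only [loopB]
    by_cases hc : (pushRun n t next st).2 ≠ [] ∧ (pushRun n t next st).2.headI = t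
    · rw [if_pos hc, if_pos hc, ih (ans + 1), ih (0 + 1)]; ring
    · rw [if_neg hc, if_neg hc]; ring

-- pushRun does nothing when the demand is below next
theorem pushRun_stop (n t next : Int) (st : List Int) (h : ¬ (next ≤ n ∧ next ≤ t)) :
    pushRun n t next st = (next, st) := by
  rw [pushRun]; simp [h]

-- popRun's output state is settled
theorem popRun_settled (order : List Int) (ans idx : Int) (st : List Int) :
    Settled order (popRun order ans idx st).2.1 (popRun order ans idx st).2.2 := by
  induction st generalizing ans idx with
  | nil => intro s hs hne; simp [popRun] at hne
  | cons a rest ih =>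
    simp only [popRun]
    split
    · exact ih _ _
    · intro s hs hne
      simp at hs; subst hs
      assumption

theorem popRun_idx_nonneg (order : List Int) (ans idx : Int) (st : List Int) (h : 0 ≤ idx) :
    0 ≤ (popRun order ans idx st).2.1 := by
  induction st generalizing ans idx with
  | nil => simpa [popRun]
  | cons a rest ih =>
    simp only [popRun]
    split
    · exact ih _ _ (by omega)
    · simpa

theorem popRun_stack_lt (order : List Int) (ans idx : Int) (st : List Int) (b : Int)
    (h : ∀ x ∈ st, x < b) : ∀ x ∈ (popRun order ans idx st).2.2, x < b := by
  induction st generalizing ans idx with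
  | nil => simp [popRun]
  | cons a rest ih =>
    simp only [popRun]
    split
    · exact ih _ _ (fun x hx => h x (List.mem_cons_of_mem _ hx))
    · exact h

-- the cascade of pops in A matches a run of no-push steps of B
theorem popRun_loopB (order : List Int) (n : Int) (st : List Int) (ans idx next : Int)
    (hidx : 0 ≤ idx) (hlt : ∀ x ∈ st, x < next) :
    ans + loopB n (dsFrom order idx) 0 st next =
      (popRun order ans idx st).1 +
        loopB n (dsFrom order (popRun order ans idx st).2.1) 0
          (popRun order ans idx st).2.2 next := by
  induction st generalizing ans idx with
  | nil => simp [popRun]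
  | cons s rest ih =>
    simp only [popRun]
    by_cases hmatch : PySem.List.pyGet? order idx = some s
    · rw [if_pos hmatch]
      rw [← ih (ans + 1) (idx + 1) (by omega) (fun x hx => hlt x (List.mem_cons_of_mem _ hx))]
      rw [dsFrom_succ order idx hidx s hmatch]
      simp only [loopB]
      have hs : s < next := hlt s (List.mem_cons_self)
      rw [pushRun_stop n s next (s :: rest) (by omega)]
      rw [if_pos (by simp : ((next, s :: rest).2 ≠ [] ∧ (next, s :: rest).2.headI = s))]
      simp only [List.tail_cons]
      rw [loopB_acc _ _ (0 + 1)]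
      ring
    · rw [if_neg hmatch]

-- main simulation lemma: A's remaining fold from box `next` equals B on remaining demands
theorem main_sim (order : List Int) (k : Nat) :
    ∀ (next ans idx : Int) (st : List Int),
      0 ≤ idx →
      ((order.length : Int) + 1 - next).toNat = k →
      1 ≤ next →
      (∀ x ∈ st, x < next) →
      Settled order idx st →
      ((PySem.List.pyRange next ((order.length : Int) + 1) 1).foldl
        (fun (s : Int × Int × List Int) i => popRun order s.1 s.2.1 (i :: s.2.2))
        (ans, idx, st)).1
        = ans + loopB (order.length : Int) (dsFrom order idx) 0 st next := by
  induction k with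
  | zero =>
    intro next ans idx st hidx hk hnext hlt hset
    have hge : (order.length : Int) + 1 ≤ next := by omega
    rw [PySem.List.pyRange_one_eq_nil hge]
    simp only [List.foldl_nil]
    cases hds : dsFrom order idx with
    | nil => simp [loopB]
    | cons t rest =>
      simp only [loopB]
      rw [pushRun_stop _ t next st (by omega)]
      cases hst : st with
      | nil => simp
      | cons s tail =>
        have : PySem.List.pyGet? order idx = some t := by
          rw [pyGet?_eq_head_dsFrom order idx hidx, hds]; rfl
        have hne : s ≠ t := by
          intro h; subst h
          exact hset s (by simp [hst]) (by simp [hst]) this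
        rw [if_neg (by simp [hne])]
        omega
  | succ k ih =>
    intro next ans idx st hidx hk hnext hlt hset
    have hltn : next < (order.length : Int) + 1 := by omega
    rw [PySem.List.pyRange_one_cons hltn]
    simp only [List.foldl_cons]
    by_cases hmatch : PySem.List.pyGet? order idx = some next
    · -- the newly pushed box matches the current demand
      have step1 : popRun order ans idx (next :: st)
          = popRun order (ans + 1) (idx + 1) st := by
        simp only [popRun, if_pos hmatch]
      rw [step1]
      set p := popRun order (ans + 1) (idx + 1) st with hp
      have hidx1 : (0:Int) ≤ idx + 1 := by omega
      have hlt1 : ∀ x ∈ st, x < next + 1 := fun x hx => by have := hlt x hx; omega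
      rw [ih (next + 1) p.1 p.2.1 p.2.2
        (popRun_idx_nonneg order (ans + 1) (idx + 1) st hidx1)
        (by omega) (by omega)
        (popRun_stack_lt order (ans + 1) (idx + 1) st (next + 1) hlt1)
        (popRun_settled order (ans + 1) (idx + 1) st)]
      have hcas := popRun_loopB order (order.length : Int) st (ans + 1) (idx + 1) (next + 1)
        hidx1 hlt1
      rw [← hcas]
      -- now relate loopB at (dsFrom idx, st, next) with the popped step
      rw [dsFrom_succ order idx hidx next hmatch]
      simp only [loopB]
      have hpush : pushRun (order.length : Int) next next st = (next + 1, next :: st) := by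
        rw [pushRun]
        rw [if_pos ⟨by omega, le_refl next⟩]
        exact pushRun_stop _ _ _ _ (by omega)
      rw [hpush]
      rw [if_pos (by simp : ((next + 1, next :: st).2 ≠ [] ∧ (next + 1, next :: st).2.headI = next))]
      simp only [List.tail_cons]
      rw [loopB_acc _ _ (0 + 1) st (next + 1)]
      ring
    · -- no match: box `next` stays on the stack
      have step1 : popRun order ans idx (next :: st) = (ans, idx, next :: st) := by
        simp only [popRun, if_neg hmatch]
      rw [step1]
      rw [ih (next + 1) ans idx (next :: st) hidx (by omega) (by omega)
        (by intro x hx; rcases List.mem_cons.mp hx with h | h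
            · omega
            · have := hlt x h; omega)
        (by intro s hs hne; simp at hs; subst hs; exact hmatch)]
      -- STEP lemma inline: loopB ds 0 st next = loopB ds 0 (next :: st) (next + 1)
      congr 1
      cases hds : dsFrom order idx with
      | nil => simp [loopB]
      | cons t rest =>
        have hPt : PySem.List.pyGet? order idx = some t := by
          rw [pyGet?_eq_head_dsFrom order idx hidx, hds]; rfl
        have htne : t ≠ next := fun h => hmatch (h ▸ hPt)
        simp only [loopB]
        by_cases hcase : next ≤ t
        · -- both sides push down to the same state
          have : pushRun (order.length : Int) t next st
              = pushRun (order.length : Int) t (next + 1) (next :: st) := by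
            rw [pushRun]
            rw [if_pos ⟨by omega, hcase⟩]
          rw [this]
        · -- t < next: no pushes on either side; neither top matches t
          rw [pushRun_stop _ t next st (by omega),
              pushRun_stop _ t (next + 1) (next :: st) (by omega)]
          cases hst : st with
          | nil =>
            rw [if_neg (by simp; omega), if_neg (by simp)]
          | cons s tail =>
            have hsne : s ≠ t := by
              intro h; subst h
              exact hset s (by simp [hst]) (by simp [hst]) hPt
            rw [if_neg (by simp; omega), if_neg (by simp; exact hsne)]

-- ===== VERDICT (by name: the statement is the Claim_ definition above) =====
theorem solution_spec : Claim_equal_solution := by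
  intro order _
  unfold Spec_solution solution solution_alt
  have h := main_sim order ((order.length : Int) + 1 - 1).toNat 1 0 0 []
    (le_refl 0) rfl (le_refl 1) (by simp) (by intro s hs hne; simp at hne)
  simp only [h]
  simp [dsFrom]
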